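-- pv_equiv track=rewrite | github.com/mkst/sssv | tools/rncu.py | swap_bits
-- ===== SOURCE A (Python) =====
-- def swap_bits(in_bits, n):
--     out_bits = 0
--     for _ in range(n):
--         out_bits <<= 1
--         if in_bits & 1:
--             out_bits |= 1
--         in_bits >>= 1
--     return out_bits
-- ===== SOURCE B (Python) =====
-- def swap_bits(in_bits, n):
--     # Divide and conquer: reverse the low n bits by splitting them into a low
--     # half and a high half, reversing each recursively, and swapping the halves.
--     if n <= 0:
--         return 0
--     if n == 1:
--         return in_bits & 1
--     lo = n // 2
--     hi = n - lo
--     low_rev = swap_bits(in_bits % (1 << lo), lo)   # low lo bits, reversed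
--     high_rev = swap_bits(in_bits >> lo, hi)        # high hi bits, reversed
--     return (low_rev << hi) + high_rev
-- ===== Notes on version B (the rewrite author's own statement) =====
-- stated objective: alternative
-- what changed: B replaces A's linear streaming loop (shift accumulator left, shift input right, one bit per iteration) by a divide-and-conquer recursion: split the low n bits into a low and a high half, reverse each half recursively, and swap the halves with a shift and an addition.
import Mathlib
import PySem

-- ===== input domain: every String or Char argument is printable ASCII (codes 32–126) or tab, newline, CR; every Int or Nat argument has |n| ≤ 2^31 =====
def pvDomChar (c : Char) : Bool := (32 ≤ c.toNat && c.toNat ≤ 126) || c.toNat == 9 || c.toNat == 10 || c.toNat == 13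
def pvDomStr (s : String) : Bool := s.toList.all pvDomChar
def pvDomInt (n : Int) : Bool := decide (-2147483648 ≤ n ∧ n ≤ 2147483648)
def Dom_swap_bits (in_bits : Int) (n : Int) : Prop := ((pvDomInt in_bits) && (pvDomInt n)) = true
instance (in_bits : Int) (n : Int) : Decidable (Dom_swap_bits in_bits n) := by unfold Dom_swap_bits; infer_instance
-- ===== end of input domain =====

-- B replaces A's linear streaming loop (shift the accumulator left, shift the input right,
-- one bit per iteration) by a divide-and-conquer recursion that splits the low n bits into
-- a low and a high half, reverses each half recursively and swaps the halves; same result,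
-- different algorithm ("alternative", no speed claim).

-- ===== PORT A =====
-- transliteration of A: state (out_bits, in_bits); 'out <<= 1; if in & 1: out |= 1; in >>= 1'
def swap_bits (in_bits : Int) (n : Int) : Int :=
  ((PySem.List.pyRange 0 n 1).foldl
    (fun (st : Int × Int) _ =>
      let out := st.1 <<< (1 : Nat)
      let out := if PySem.Int.band st.2 1 ≠ 0 then PySem.Int.bor out 1 else out
      (out, st.2 >>> (1 : Nat)))
    (0, in_bits)).1

-- ===== PORT B =====
-- transliteration of Source B's divide-and-conquer; in the recursive branch n ≥ 2, so
-- lo ≥ 1 and hi ≥ 1 and the '.toNat' on the (nonnegative) shift amounts is exact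
def swap_bits_alt (in_bits : Int) (n : Int) : Int :=
  if n ≤ 0 then 0
  else if n = 1 then PySem.Int.band in_bits 1
  else
    let lo := PySem.Int.floordiv n 2
    let hi := n - lo
    let low_rev := swap_bits_alt (PySem.Int.mod in_bits ((1 : Int) <<< lo.toNat)) lo
    let high_rev := swap_bits_alt (in_bits >>> lo.toNat) hi
    (low_rev <<< hi.toNat) + high_rev
termination_by n.toNat
decreasing_by
  · simp only [PySem.Int.floordiv]; rw [Int.fdiv_eq_ediv]; simp; omega
  · simp only [PySem.Int.floordiv]; rw [Int.fdiv_eq_ediv]; simp; omega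

-- ===== PRECONDITION & SPEC =====
def Spec_swap_bits (in_bits : Int) (n : Int) (out : Int) : Prop := out = swap_bits_alt in_bits n
instance (in_bits : Int) (n : Int) (out : Int) : Decidable (Spec_swap_bits in_bits n out) := by unfold Spec_swap_bits; infer_instance

-- ===== CLAIM (what is proved, stated in full; the proofs are below) =====
def Claim_equal_swap_bits : Prop := ∀ (in_bits : Int) (n : Int), Dom_swap_bits in_bits n → Spec_swap_bits in_bits n (swap_bits in_bits n)

-- ===== LEMMAS AND PROOFS =====

-- mathematical reference value: the lowest k bits of x, reversed
def pvRev (x : Int) : Nat → Int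
  | 0 => 0
  | k+1 => PySem.Int.band x 1 * 2 ^ k + pvRev (x >>> (1 : Nat)) k

lemma pv_band_one_cases (x : Int) : PySem.Int.band x 1 = 0 ∨ PySem.Int.band x 1 = 1 := by
  rw [PySem.Int.band_one]
  simp only [PySem.Int.mod]
  rw [Int.fmod_eq_emod]
  simp only [if_pos (Or.inl (by norm_num : (0:Int) ≤ 2))]
  omega

lemma pv_bor_two_mul_one (o : Int) : PySem.Int.bor (2 * o) 1 = 2 * o + 1 := by
  simp only [PySem.Int.bor]
  by_cases h : (0:Int) ≤ 2 * o
  · rw [if_pos h, if_pos (by norm_num : (0:Int) ≤ 1)]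
    have hk : (2 * o).toNat = 2 * o.toNat := by omega
    have h1 : (1 : Int).toNat = 1 := rfl
    have hnat : 2 * o.toNat ||| 1 = 2 * o.toNat + 1 := by
      apply Nat.eq_of_testBit_eq
      intro i
      rw [Nat.testBit_lor]
      cases i with
      | zero => simp [Nat.testBit_zero]
      | succ j =>
          rw [Nat.testBit_add_one, Nat.testBit_add_one, Nat.testBit_add_one]
          have e1 : (2 * o.toNat + 1) / 2 = o.toNat := by omega
          have e2 : (2 * o.toNat) / 2 = o.toNat := by omega
          simp [e1, e2]
    rw [hk, h1, hnat]
    omega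
  · rw [if_neg h, if_pos (by norm_num : (0:Int) ≤ 1)]
    have h1 : (1 : Int).toNat = 1 := rfl
    rw [h1, Nat.and_one_is_mod]
    omega

-- A's loop step equals '2*out + (x & 1)' with the input halved
lemma pv_stepA (o x : Int) :
    (let out := o <<< (1 : Nat)
     let out := if PySem.Int.band x 1 ≠ 0 then PySem.Int.bor out 1 else out
     ((out, x >>> (1 : Nat)) : Int × Int))
    = (2 * o + PySem.Int.band x 1, x >>> (1 : Nat)) := by
  have hs : o <<< (1 : Nat) = 2 * o := by simp [Int.shiftLeft_eq]; ring
  rcases pv_band_one_cases x with h | h <;> simp [hs, h, pv_bor_two_mul_one]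

-- A's fold depends only on the length of the range
lemma pv_foldA (l : List Int) : ∀ (o x : Int),
    (l.foldl
      (fun (st : Int × Int) _ =>
        let out := st.1 <<< (1 : Nat)
        let out := if PySem.Int.band st.2 1 ≠ 0 then PySem.Int.bor out 1 else out
        (out, st.2 >>> (1 : Nat)))
      (o, x)).1 = o * 2 ^ l.length + pvRev x l.length := by
  induction l with
  | nil => intro o x; simp [pvRev]
  | cons a t ih =>
      intro o x
      rw [List.foldl_cons, pv_stepA, ih]
      simp [pvRev, pow_succ]
      ring

-- A's port computes pvRev of the low n.toNat bits
lemma pv_A_eq (x n : Int) : swap_bits x n = pvRev x n.toNat := by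
  unfold swap_bits
  by_cases hn : 0 ≤ n
  · rw [pv_foldA]
    simp [PySem.List.length_pyRange_one]
  · rw [PySem.List.pyRange_one_eq_nil (by omega)]
    have : n.toNat = 0 := by omega
    simp [this, pvRev]

-- Python '%' by a positive power of two is emod
lemma pv_fmod_pow (x : Int) (m : Nat) : PySem.Int.mod x ((2:Int) ^ m) = x % 2 ^ m := by
  simp only [PySem.Int.mod]
  rw [Int.fmod_eq_emod]
  simp only [if_pos (Or.inl (by positivity : (0:Int) ≤ 2 ^ m))]
  omega

-- the low bit of x mod 2^(k+1) is the low bit of x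
lemma pv_emod_band1 (x : Int) (k : Nat) :
    PySem.Int.band (x % 2 ^ (k+1)) 1 = PySem.Int.band x 1 := by
  rw [PySem.Int.band_one, PySem.Int.band_one]
  simp only [PySem.Int.mod]
  rw [Int.fmod_eq_emod, Int.fmod_eq_emod]
  simp only [if_pos (Or.inl (by norm_num : (0:Int) ≤ 2))]
  rw [Int.emod_emod_of_dvd x (by exact Dvd.intro (2 ^ k) (by ring))]

-- shifting x mod 2^(k+1) right once is (x >> 1) mod 2^k
lemma pv_emod_shift (x : Int) (k : Nat) :
    (x % (2:Int) ^ (k+1)) >>> (1 : Nat) = (x >>> (1 : Nat)) % 2 ^ k := by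
  rw [Int.shiftRight_eq_div_pow, Int.shiftRight_eq_div_pow]
  rw [show (((2:Nat) ^ 1 : Nat) : Int) = 2 from by norm_num]
  have hP : (0:Int) < 2 ^ k := by positivity
  have hdiv : x = 2 ^ (k+1) * (x / 2 ^ (k+1)) + x % 2 ^ (k+1) := (Int.ediv_add_emod x _).symm
  set q := x / (2:Int) ^ (k+1) with hq
  set r := x % (2:Int) ^ (k+1) with hr
  have hr0 : 0 ≤ r := Int.emod_nonneg x (by positivity)
  have hr1 : r < 2 ^ (k+1) := Int.emod_lt_of_pos x (by positivity)
  have hx2 : x / 2 = r / 2 + 2 ^ k * q := by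
    have : x = r + 2 * (2 ^ k * q) := by rw [hdiv]; ring
    rw [this, Int.add_mul_ediv_left r _ (by norm_num)]
  rw [hx2, Int.add_mul_emod_self_left]
  have h2 : r / 2 < 2 ^ k := by
    have : r < 2 * 2 ^ k := by rw [pow_succ] at hr1; omega
    omega
  exact (Int.emod_eq_of_lt (by omega) h2).symm

-- splitting pvRev: low a bits go on top, high b bits on the bottom
lemma pv_split (a : Nat) : ∀ (b : Nat) (x : Int),
    pvRev x (a + b) = pvRev (x % (2:Int) ^ a) a * 2 ^ b + pvRev (x >>> a) b := by
  induction a with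
  | zero => intro b x; simp [pvRev]
  | succ k ih =>
      intro b x
      have h1 : k + 1 + b = (k + b) + 1 := by omega
      rw [h1]
      show PySem.Int.band x 1 * 2 ^ (k + b) + pvRev (x >>> (1:Nat)) (k + b) = _
      rw [ih b (x >>> (1:Nat))]
      have hsr : x >>> (k + 1 : Nat) = (x >>> (1:Nat)) >>> (k : Nat) := by
        rw [Nat.add_comm k 1, Int.shiftRight_add]
      show _ = (PySem.Int.band (x % 2 ^ (k+1)) 1 * 2 ^ k
                 + pvRev ((x % 2 ^ (k+1)) >>> (1:Nat)) k) * 2 ^ b + pvRev (x >>> (k+1 : Nat)) b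
      rw [pv_emod_band1, pv_emod_shift, hsr, pow_add]
      ring

-- B's port computes pvRev of the low n.toNat bits
lemma pv_B_eq (k : Nat) : ∀ (x n : Int), n.toNat = k → swap_bits_alt x n = pvRev x n.toNat := by
  induction k using Nat.strong_induction_on with
  | _ k ih =>
    intro x n hk
    rw [swap_bits_alt]
    by_cases h0 : n ≤ 0
    · have : n.toNat = 0 := by omega
      simp [h0, this, pvRev]
    · by_cases h1 : n = 1
      · subst h1
        simp [pvRev]
      · rw [if_neg h0, if_neg h1]
        have hn2 : 2 ≤ n := by omega
        have hlo : PySem.Int.floordiv n 2 = n / 2 := by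
          simp only [PySem.Int.floordiv]; rw [Int.fdiv_eq_ediv]; simp
        simp only [hlo]
        have hlo1 : 1 ≤ n / 2 := by omega
        have hlon : n / 2 < n := by omega
        have hsh : ((1:Int) <<< (n / 2).toNat) = (2:Int) ^ (n / 2).toNat := by
          rw [Int.shiftLeft_eq]; ring
        rw [hsh, pv_fmod_pow]
        rw [ih (n / 2).toNat (by omega) _ (n / 2) rfl,
            ih (n - n / 2).toNat (by omega) _ (n - n / 2) rfl]
        have hadd : n.toNat = (n / 2).toNat + (n - n / 2).toNat := by omega
        rw [hadd, pv_split]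
        rw [Int.shiftLeft_eq]

-- ===== VERDICT (by name: the statement is the Claim_ definition above) =====
theorem swap_bits_spec : Claim_equal_swap_bits := by
  intro in_bits n _
  unfold Spec_swap_bits
  rw [pv_A_eq, pv_B_eq n.toNat in_bits n rfl]
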